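-- pv_equiv track=rewrite | github.com/fabiobrambilla98/Progetto-IR | classes/engine.py | _from_categorical
-- ===== SOURCE A (Python) =====
-- def _from_categorical(vec):
--     new_vec = []
--     for v in vec:
--         max = v[0]
--         index = 0
--         for i, val in enumerate(v):
--             if (val > max):
--                 max = val
--                 index = i
--         new_vec.append(index)
--     return new_vec
-- ===== SOURCE B (Python) =====
-- def _from_categorical(vec):
--     return [sorted(enumerate(v), key=lambda p: p[1], reverse=True)[0][0] for v in vec]
-- ===== Notes on version B (the rewrite author's own statement) =====
-- stated objective: alternative
-- what changed: Replaces A's single-pass running-max/running-index loop per vector with a sort-based argmax: stable-reverse-sort the (index, value) pairs of enumerate(v) by value and take the first pair's index; Python's stable sort with reverse=True keeps equal values in original order, so the head is the first occurrence of the maximum, matching A's tie-breaking.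
import Mathlib
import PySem

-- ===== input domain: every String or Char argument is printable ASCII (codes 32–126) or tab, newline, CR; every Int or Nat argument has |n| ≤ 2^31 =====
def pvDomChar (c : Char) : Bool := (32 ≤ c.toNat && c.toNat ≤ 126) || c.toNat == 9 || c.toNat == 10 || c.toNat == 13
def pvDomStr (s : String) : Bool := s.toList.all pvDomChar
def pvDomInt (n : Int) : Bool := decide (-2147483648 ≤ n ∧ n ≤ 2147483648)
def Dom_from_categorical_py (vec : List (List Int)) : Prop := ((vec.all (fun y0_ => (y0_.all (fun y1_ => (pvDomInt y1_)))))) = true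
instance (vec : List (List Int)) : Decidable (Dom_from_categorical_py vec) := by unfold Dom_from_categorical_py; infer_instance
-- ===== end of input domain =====

-- B replaces A's per-vector running-max/running-index loop with a sort-based argmax:
-- stable-reverse-sort the enumerate pairs by value and take the head's index (same
-- first-max-on-ties result; a different algorithm, not faster).

-- ===== PORT A =====
-- A: for each v, max = v[0], index = 0; scan enumerate(v) keeping strictly larger
-- value and its index; append index.
def from_categorical_py (vec : List (List Int)) : List Int :=
  vec.foldl (fun new_vec v =>
    match v with
    | [] => new_vec ++ [0]   -- unreachable under Pre_: v[0] raises IndexError in Python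
    | x :: _ =>
      let st := (PySem.List.enumerate v 0).foldl
        (fun (p : Int × Int) (e : Int × Int) => if e.2 > p.1 then (e.2, e.1) else p) (x, 0)
      new_vec ++ [st.2]) []

-- ===== PORT B =====
-- B: [sorted(enumerate(v), key=lambda p: p[1], reverse=True)[0][0] for v in vec]
def from_categorical_py_alt (vec : List (List Int)) : List Int :=
  vec.map (fun v =>
    match PySem.List.sorted (PySem.List.enumerate v 0) (fun p => p.2) true with
    | [] => 0   -- unreachable under Pre_: [][0] raises IndexError in Python
    | p :: _ => p.1)

-- ===== PRECONDITION & SPEC =====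
-- Pre_ excludes vectors containing an empty inner list: there A raises IndexError
-- (v[0]) and B raises IndexError (sorted(...)[0]), so neither returns a value.
def Pre_from_categorical_py (vec : List (List Int)) : Prop := ∀ v ∈ vec, v ≠ []
instance (vec : List (List Int)) : Decidable (Pre_from_categorical_py vec) := by
  unfold Pre_from_categorical_py; infer_instance

def pvWitness_from_categorical_py : List (List Int) := [[1, 3, 3], [5], [-2, -2, -1]]

def Spec_from_categorical_py (vec : List (List Int)) (out : List Int) : Prop := out = from_categorical_py_alt vec
instance (vec : List (List Int)) (out : List Int) : Decidable (Spec_from_categorical_py vec out) := by unfold Spec_from_categorical_py; infer_instance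

-- ===== CLAIM =====
def Claim_equal_from_categorical_py : Prop := ∀ (vec : List (List Int)), Dom_from_categorical_py vec → Pre_from_categorical_py vec → Spec_from_categorical_py vec (from_categorical_py vec)

-- ===== LEMMAS AND PROOFS =====

-- head of one reverse-order stable insertion step
theorem head_insertBy_rev {α κ : Type} [LinearOrder κ] (key : α → κ) (x h : α) (t : List α) :
    PySem.List.insertBy (fun a b => decide (key b < key a)) x (h :: t)
      = if key h < key x then x :: h :: t
        else h :: PySem.List.insertBy (fun a b => decide (key b < key a)) x t := by
  by_cases hc : key h < key x <;> simp [PySem.List.insertBy, hc]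

-- head of the reverse insertion-sort fold is the first-max fold
theorem head_foldl_insertBy_rev {α κ : Type} [LinearOrder κ] (key : α → κ) :
    ∀ (l : List α) (h : α) (t : List α),
    (l.foldl (fun acc x => PySem.List.insertBy (fun a b => decide (key b < key a)) x acc) (h :: t)).head?
      = some (l.foldl (fun m x => if key m < key x then x else m) h) := by
  intro l
  induction l with
  | nil => intro h t; rfl
  | cons x l ih =>
    intro h t
    simp only [List.foldl_cons, head_insertBy_rev key x h t]
    by_cases hc : key h < key x
    · simp [hc, ih]
    · simp [hc, ih]

-- the head of sorted(xs, key, reverse=True) for nonempty xs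
theorem head_sorted_rev {α κ : Type} [LinearOrder κ] (key : α → κ) (x : α) (l : List α) :
    (PySem.List.sorted (x :: l) key true).head?
      = some (l.foldl (fun m y => if key m < key y then y else m) x) := by
  rw [PySem.List.sorted_rev_eq_foldl_insertBy]
  simp only [List.foldl_cons, PySem.List.insertBy]
  exact head_foldl_insertBy_rev key l x []

-- A's (max, index) fold is the swap of the first-max fold on (index, value) pairs
theorem foldA_eq_swap_first_max (l : List (Int × Int)) :
    ∀ (m i : Int),
    l.foldl (fun (p : Int × Int) (e : Int × Int) => if e.2 > p.1 then (e.2, e.1) else p) (m, i)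
      = Prod.swap (l.foldl (fun (p : Int × Int) (e : Int × Int) => if p.2 < e.2 then e else p) (i, m)) := by
  induction l with
  | nil => intro m i; rfl
  | cons e l ih =>
    intro m i
    simp only [List.foldl_cons]
    by_cases hc : m < e.2
    · have : e.2 > m := hc
      simp [this, ih]
    · have : ¬ e.2 > m := hc
      simp [this, ih]

theorem foldl_append_eq_map (vec : List (List Int)) (g : List Int → Int) :
    ∀ acc, vec.foldl (fun a v => a ++ [g v]) acc = acc ++ vec.map g := by
  induction vec with
  | nil => simp
  | cons v vec ih => intro acc; simp [ih]

-- ===== VERDICT =====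
theorem from_categorical_py_spec : Claim_equal_from_categorical_py := by
  intro vec _ hpre
  unfold Spec_from_categorical_py from_categorical_py from_categorical_py_alt
  have hshape : (fun (new_vec : List Int) (v : List Int) =>
      match v with
      | [] => new_vec ++ [0]
      | x :: _ =>
        let st := (PySem.List.enumerate v 0).foldl
          (fun (p : Int × Int) (e : Int × Int) => if e.2 > p.1 then (e.2, e.1) else p) (x, 0)
        new_vec ++ [st.2]) = (fun new_vec v =>
      new_vec ++ [match v with
        | [] => 0
        | x :: _ =>
          ((PySem.List.enumerate v 0).foldl
            (fun (p : Int × Int) (e : Int × Int) => if e.2 > p.1 then (e.2, e.1) else p) (x, 0)).2]) := by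
    funext a v; cases v <;> rfl
  rw [hshape, foldl_append_eq_map]
  simp only [List.nil_append]
  apply List.map_congr_left
  intro v hv
  cases v with
  | nil => exact absurd rfl (hpre [] hv)
  | cons x t =>
    -- left side: A's loop over enumerate (x :: t) 0, starting at (x, 0)
    rw [PySem.List.enumerate_cons]
    simp only [List.foldl_cons]
    -- the first enumerate pair (0, x) does not change the accumulator (x > x is false)
    have h0 : ((if ((0:Int), x).2 > ((x:Int), (0:Int)).1 then (((0:Int), x).2, ((0:Int), x).1) else (x, 0)) : Int × Int) = (x, 0) := by
      simp
    rw [h0, foldA_eq_swap_first_max]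
    simp only [zero_add]
    -- right side: head of the reverse sort
    have hb := head_sorted_rev (fun p : Int × Int => p.2) (0, x) (PySem.List.enumerate t 1)
    -- turn the match on the sorted list into the head
    cases hs : PySem.List.sorted ((0, x) :: PySem.List.enumerate t 1) (fun p => p.2) true with
    | nil =>
      exact absurd hs (by simp [PySem.List.sorted_eq_nil_iff])
    | cons p rest =>
      rw [hs] at hb
      simp only [List.head?_cons, Option.some.injEq] at hb
      simp [hb, Prod.swap]
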